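-- pv_equiv track=rewrite | github.com/lflfm/pys3b | s3_browser/tk_view.py | _split_size_bytes
-- ===== SOURCE A (Python) =====
-- SIZE_UNIT_FACTORS = {"B": 1, "KB": 1024, "MB": 1024 * 1024}
--
-- def _split_size_bytes(size_bytes: int) -> tuple[str, str]:
--     if size_bytes <= 0:
--         return ("1", "MB")
--     for unit in ("MB", "KB"):
--         factor = SIZE_UNIT_FACTORS[unit]
--         if size_bytes >= factor and size_bytes % factor == 0:
--             return (str(size_bytes // factor), unit)
--     return (str(size_bytes), "B")
-- ===== SOURCE B (Python) =====
-- def _split_size_bytes(size_bytes: int) -> tuple[str, str]: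
--     if size_bytes <= 0:
--         return ("1", "MB")
--     units = ("B", "KB", "MB")
--     value = size_bytes
--     idx = 0
--     while idx < 2 and value % 1024 == 0:
--         value //= 1024
--         idx += 1
--     return (str(value), units[idx])
-- ===== Notes on version B (the rewrite author's own statement) =====
-- stated objective: alternative
-- what changed: Instead of testing the full precomputed MB and KB factors in descending order, B climbs a unit ladder by repeatedly dividing a running quotient by the base while it divides evenly, then indexes the unit name by how many divisions happened.
import Mathlib
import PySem

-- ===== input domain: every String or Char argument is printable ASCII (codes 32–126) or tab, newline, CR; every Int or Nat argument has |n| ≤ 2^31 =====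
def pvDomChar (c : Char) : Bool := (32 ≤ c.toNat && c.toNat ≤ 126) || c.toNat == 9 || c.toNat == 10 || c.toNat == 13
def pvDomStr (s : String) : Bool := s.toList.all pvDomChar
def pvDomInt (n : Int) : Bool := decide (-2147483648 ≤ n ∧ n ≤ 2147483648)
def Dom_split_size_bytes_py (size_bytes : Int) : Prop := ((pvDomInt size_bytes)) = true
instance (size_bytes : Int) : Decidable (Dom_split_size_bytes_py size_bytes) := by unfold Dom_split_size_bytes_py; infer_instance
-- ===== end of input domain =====

-- B replaces the descending test of precomputed factors by an ascending repeated-division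
-- climb of a unit ladder (alternative decomposition, same cost).


-- ===== PORT A =====
def split_size_bytes_py (size_bytes : Int) : String × String :=
  if size_bytes ≤ 0 then ("1", "MB")
  else if 1048576 ≤ size_bytes ∧ PySem.Int.mod size_bytes 1048576 = 0 then
    (PySem.Int.toStr (PySem.Int.floordiv size_bytes 1048576), "MB")
  else if 1024 ≤ size_bytes ∧ PySem.Int.mod size_bytes 1024 = 0 then
    (PySem.Int.toStr (PySem.Int.floordiv size_bytes 1024), "KB")
  else (PySem.Int.toStr size_bytes, "B")

-- ===== PORT B =====
-- the while loop: while idx < 2 and value % 1024 == 0: value //= 1024; idx += 1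
def pvAltLoop (value : Int) (idx : Nat) : Int × Nat :=
  if idx < 2 ∧ PySem.Int.mod value 1024 = 0 then
    pvAltLoop (PySem.Int.floordiv value 1024) (idx + 1)
  else (value, idx)
termination_by 2 - idx
decreasing_by omega

def split_size_bytes_py_alt (size_bytes : Int) : String × String :=
  if size_bytes ≤ 0 then ("1", "MB")
  else
    let r := pvAltLoop size_bytes 0
    -- units[idx]; idx ≤ 2 always, so the Python index is in range
    (PySem.Int.toStr r.1, (PySem.List.pyGet? ["B", "KB", "MB"] (r.2 : Int)).getD "")

-- ===== PRECONDITION & SPEC =====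
def Spec_split_size_bytes_py (size_bytes : Int) (out : String × String) : Prop := out = split_size_bytes_py_alt size_bytes
instance (size_bytes : Int) (out : String × String) : Decidable (Spec_split_size_bytes_py size_bytes out) := by unfold Spec_split_size_bytes_py; infer_instance

-- ===== CLAIM (what is proved, stated in full; the proofs are below) =====
def Claim_equal_split_size_bytes_py : Prop := ∀ (size_bytes : Int), Dom_split_size_bytes_py size_bytes → Spec_split_size_bytes_py size_bytes (split_size_bytes_py size_bytes)

-- ===== LEMMAS AND PROOFS =====

theorem pvMod_pos (a b : Int) (hb : 0 < b) : PySem.Int.mod a b = a % b :=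
  PySem.Int.mod_eq_emod_of_pos hb

theorem pvDiv_pos (a b : Int) (hb : 0 < b) : PySem.Int.floordiv a b = a / b :=
  PySem.Int.floordiv_eq_ediv_of_pos hb

theorem pvAltLoop_stop (v : Int) (i : Nat) (h : ¬ (i < 2 ∧ PySem.Int.mod v 1024 = 0)) :
    pvAltLoop v i = (v, i) := by
  rw [pvAltLoop]; simp only [if_neg h]

theorem pvAltLoop_step (v : Int) (i : Nat) (h : i < 2 ∧ PySem.Int.mod v 1024 = 0) :
    pvAltLoop v i = pvAltLoop (PySem.Int.floordiv v 1024) (i + 1) := by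
  rw [pvAltLoop]; simp only [if_pos h]

theorem split_size_bytes_py_spec : Claim_equal_split_size_bytes_py := by
  unfold Claim_equal_split_size_bytes_py Spec_split_size_bytes_py
  intro n _
  unfold split_size_bytes_py split_size_bytes_py_alt
  by_cases hn : n ≤ 0
  · simp [hn]
  · have h0 : 0 < n := by omega
    simp only [if_neg hn]
    by_cases h1 : n % 1024 = 0
    · by_cases h2 : (n / 1024) % 1024 = 0
      · -- MB case
        rw [pvAltLoop_step n 0 ⟨by omega, by rw [pvMod_pos n 1024 (by norm_num)]; exact h1⟩,
            pvDiv_pos n 1024 (by norm_num),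
            pvAltLoop_step (n / 1024) 1 ⟨by omega, by rw [pvMod_pos (n/1024) 1024 (by norm_num)]; exact h2⟩,
            pvDiv_pos (n / 1024) 1024 (by norm_num),
            pvAltLoop_stop _ 2 (by omega)]
        have hmod : n % 1048576 = 0 := by omega
        have hge : 1048576 ≤ n := by omega
        rw [if_pos ⟨hge, by rw [pvMod_pos n 1048576 (by norm_num)]; exact hmod⟩,
            pvDiv_pos n 1048576 (by norm_num)]
        have hdd : n / 1024 / 1024 = n / 1048576 := by omega
        simp [hdd, PySem.List.pyGet?, PySem.List.pyIdx?]
      · -- KB case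
        rw [pvAltLoop_step n 0 ⟨by omega, by rw [pvMod_pos n 1024 (by norm_num)]; exact h1⟩,
            pvDiv_pos n 1024 (by norm_num),
            pvAltLoop_stop _ 1 (by
              rw [pvMod_pos (n/1024) 1024 (by norm_num)]
              simp [h2])]
        have hnot : ¬ (1048576 ≤ n ∧ PySem.Int.mod n 1048576 = 0) := by
          rw [pvMod_pos n 1048576 (by norm_num)]
          rintro ⟨-, hm⟩
          omega
        rw [if_neg hnot,
            if_pos ⟨by omega, by rw [pvMod_pos n 1024 (by norm_num)]; exact h1⟩]
        simp [PySem.List.pyGet?, PySem.List.pyIdx?]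
    · -- B case
      rw [pvAltLoop_stop n 0 (by
            rw [pvMod_pos n 1024 (by norm_num)]
            simp [h1])]
      have hnot1 : ¬ (1048576 ≤ n ∧ PySem.Int.mod n 1048576 = 0) := by
        rw [pvMod_pos n 1048576 (by norm_num)]
        rintro ⟨-, hm⟩
        omega
      have hnot2 : ¬ (1024 ≤ n ∧ PySem.Int.mod n 1024 = 0) := by
        rw [pvMod_pos n 1024 (by norm_num)]
        rintro ⟨-, hm⟩
        exact h1 hm
      rw [if_neg hnot1, if_neg hnot2]
      simp [PySem.List.pyGet?, PySem.List.pyIdx?]
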